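-- pv_equiv track=rewrite | github.com/Salmoli-sys/Webscrapping_Fashion | na-kd6.py | parse_panel_text
-- ===== SOURCE A (Python) =====
-- def parse_panel_text(text):
--     """
--     Convert colon-delimited blocks into a dict.
--     """
--     lines = [line.strip() for line in text.splitlines() if line.strip()]
--     data = {}
--     key = None
--     for line in lines:
--         if line.endswith(":"):
--             key = line[:-1]
--             data[key] = []
--         elif key:
--             data[key].append(line)
--     return {header: "\n".join(items) for header, items in data.items()}
-- ===== SOURCE B (Python) =====
-- def parse_panel_text(text):
--     """
--     Convert colon-delimited blocks into a dict (index-then-partition: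
--     locate the header lines first, then slice out each block).
--     """
--     lines = [ln.strip() for ln in text.splitlines() if ln.strip()]
--     headers = [i for i, ln in enumerate(lines) if ln.endswith(":")]
--     result = {}
--     for h, nxt in zip(headers, headers[1:] + [len(lines)]):
--         result[lines[h][:-1]] = "\n".join(lines[h + 1 : nxt])
--     return result
-- ===== Notes on version B (the rewrite author's own statement) =====
-- stated objective: alternative
-- what changed: Replaces A's single pass with a running dict-of-lists accumulator by an index-then-partition decomposition: first collect the indices of header lines, then slice each block out between consecutive headers and join it.
-- intended difference: On texts whose last ':'-only line (empty header key) is immediately followed by a content line, A returns '' for the empty key because its 'elif key:' truthiness guard silently drops the block's lines, while B joins them like for any other header, which is the intended uniform treatment of headers. — e.g. on parse_panel_text(":\nx"): A returns [("", "")], B returns [("", "x")]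
import Mathlib
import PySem

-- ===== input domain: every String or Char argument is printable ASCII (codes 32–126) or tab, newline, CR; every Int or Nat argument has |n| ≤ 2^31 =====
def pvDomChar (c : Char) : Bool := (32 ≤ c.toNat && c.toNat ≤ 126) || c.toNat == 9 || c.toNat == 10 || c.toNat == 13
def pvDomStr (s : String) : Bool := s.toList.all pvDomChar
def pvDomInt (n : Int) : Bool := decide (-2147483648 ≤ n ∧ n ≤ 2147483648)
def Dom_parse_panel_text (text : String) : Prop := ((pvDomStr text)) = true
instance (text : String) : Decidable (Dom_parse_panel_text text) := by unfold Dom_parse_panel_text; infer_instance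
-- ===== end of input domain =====

-- B re-implements the parser by an index-then-partition decomposition (same cost); on texts where
-- the last ':'-only line is followed by content, A's truthiness guard drops that block and B keeps it (see D_).

-- ===== PORT A =====
-- lines = [line.strip() for line in text.splitlines() if line.strip()]  (truthy string = nonempty;
-- filtering the stripped values equals filtering on line.strip() since the predicate reads the stripped value)
def pvClean (text : String) : List String :=
  ((PySem.Str.splitlines text).map PySem.Str.strip).filter (fun l => l ≠ "")

-- the body of A's for-loop over (data, key); data[key].append(line) is ported as modify with
-- default [] — exact here because A only appends when key was inserted before (data[key] = [])
def pvStepA (st : PySem.Dict String (List String) × Option String) (line : String) :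
    PySem.Dict String (List String) × Option String :=
  if PySem.Str.endswith line ":" then
    let k := PySem.Str.slice line none (some (-1))
    (st.1.insert k [], some k)
  else
    match st.2 with
    | none => st
    | some k => if k = "" then st else (st.1.modify k [] (fun v => v ++ [line]), st.2)

def parse_panel_text (text : String) : List (String × String) :=
  let lines := pvClean text
  let st := lines.foldl pvStepA (PySem.Dict.empty, none)
  st.1.items.map (fun p => (p.1, PySem.Str.join "\n" p.2))

-- ===== PORT B =====
def parse_panel_text_alt (text : String) : List (String × String) :=
  let lines := pvClean text
  let headers : List Int :=
    ((PySem.List.enumerate lines 0).filter (fun p => PySem.Str.endswith p.2 ":")).map (fun p => p.1)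
  -- zip(headers, headers[1:] + [len(lines)]); lines[h] is ported with pyGetD (h is always in range)
  let res := (headers.zip (PySem.List.slice headers (some 1) none ++ [(lines.length : Int)])).foldl
      (fun (d : PySem.Dict String String) p =>
        d.insert (PySem.Str.slice (PySem.List.pyGetD lines p.1 "") none (some (-1)))
                 (PySem.Str.join "\n" (PySem.List.slice lines (some (p.1 + 1)) (some p.2))))
      PySem.Dict.empty
  res.items

-- ===== PRECONDITION & SPEC =====
-- On texts whose last ':'-only line (empty header key) is immediately followed by a content line,
-- A returns "" for the empty key (its `elif key:` truthiness guard silently drops the block's lines)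
-- while B joins those lines like for any other header, which is the intended uniform treatment.
def D_parse_panel_text (text : String) : Prop :=
  ":" ∈ pvClean text ∧
    (((pvClean text).reverse.takeWhile (fun l => l != ":")).reverse.takeWhile
      (fun l => !PySem.Str.endswith l ":") ≠ [])
instance (text : String) : Decidable (D_parse_panel_text text) := by
  unfold D_parse_panel_text; infer_instance

def Spec_parse_panel_text (text : String) (out : List (String × String)) : Prop :=
  ¬ D_parse_panel_text text → out = parse_panel_text_alt text
instance (text : String) (out : List (String × String)) : Decidable (Spec_parse_panel_text text out) := by
  unfold Spec_parse_panel_text; infer_instance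

def pvDiffWitness_parse_panel_text : String := ":\nx"
def pvDiffWitnessOut_parse_panel_text : (List (String × String)) × (List (String × String)) :=
  ([("", "")], [("", "x")])

-- ===== CLAIM (what is proved, stated in full; the proofs are below) =====
def Claim_unchanged_parse_panel_text : Prop :=
  ∀ (text : String), Dom_parse_panel_text text → Spec_parse_panel_text text (parse_panel_text text)
def Claim_changed_parse_panel_text : Prop :=
  Dom_parse_panel_text (pvDiffWitness_parse_panel_text) ∧
  D_parse_panel_text (pvDiffWitness_parse_panel_text) ∧
  parse_panel_text (pvDiffWitness_parse_panel_text) = pvDiffWitnessOut_parse_panel_text.1 ∧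
  parse_panel_text_alt (pvDiffWitness_parse_panel_text) = pvDiffWitnessOut_parse_panel_text.2 ∧
  pvDiffWitnessOut_parse_panel_text.1 ≠ pvDiffWitnessOut_parse_panel_text.2
def Claim_exact_parse_panel_text : Prop :=
  ∀ (text : String), Dom_parse_panel_text text → D_parse_panel_text text →
    parse_panel_text text ≠ parse_panel_text_alt text

-- ===== LEMMAS AND PROOFS =====

def pvHdr (l : String) : Bool := PySem.Str.endswith l ":"
def pvKey (l : String) : String := PySem.Str.slice l none (some (-1))
def pvJoin (xs : List String) : String := PySem.Str.join "\n" xs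
def pvBlk (r : List String) : List String := r.takeWhile (fun x => !pvHdr x)

/-- the (key, block) pairs of the header lines, in order -/
def pvPairs : List String → List (String × String)
  | [] => []
  | l :: r => if pvHdr l then (pvKey l, pvJoin (pvBlk r)) :: pvPairs r else pvPairs r

def pvIns (d : PySem.Dict String String) (p : String × String) : PySem.Dict String String :=
  d.insert p.1 p.2

/-- map A's dict of line-lists to the final dict of joined strings -/
def pvFin (d : PySem.Dict String (List String)) : PySem.Dict String String :=
  PySem.Dict.mk (d.items.map (fun p => (p.1, pvJoin p.2)))

def pvPatch (d : PySem.Dict String (List String)) (k : Option String) (lines : List String) :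
    PySem.Dict String String :=
  match k with
  | none => pvFin d
  | some key => if key = "" then pvFin d else pvFin (d.insert key (d.getD key [] ++ pvBlk lines))

/-- items may differ only in the value at key "" -/
def pvR (p q : String × String) : Prop := p.1 = q.1 ∧ (p.2 = q.2 ∨ p.1 = "")

/-- the block after the LAST ':'-line is empty (¬ D, given ":" occurs) -/
def pvC (lines : List String) : Prop :=
  ":" ∈ lines → pvBlk ((lines.reverse.takeWhile (fun l => l != ":")).reverse) = []

/-- header indices, starting at position t -/
def pvHIdx (t : Nat) : List String → List Nat
  | [] => []
  | l :: r => if pvHdr l then t :: pvHIdx (t+1) r else pvHIdx (t+1) r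

/-- B's loop body, over Nat index pairs into the full list -/
def pvFn (full : List String) (p : Nat × Nat) : String × String :=
  (pvKey (full.getD p.1 ""), pvJoin ((full.drop (p.1+1)).take (p.2 - (p.1+1))))

-- ---- small facts ----

theorem pvR_refl (l : List (String × String)) : List.Forall₂ pvR l l := by
  induction l with
  | nil => exact List.Forall₂.nil
  | cons x xs ih => exact List.Forall₂.cons ⟨rfl, Or.inl rfl⟩ ih

theorem pvR_fst (l1 l2 : List (String × String)) (h : List.Forall₂ pvR l1 l2) :
    l1.map (fun p => p.1) = l2.map (fun p => p.1) := by
  induction h with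
  | nil => rfl
  | cons hpq _ ih => simp [hpq.1, ih]

theorem pv_hdr_key_colon (l : String) (h1 : pvHdr l = true) (h2 : pvKey l = "") : l = ":" := by
  have hd : l.toList.dropLast = [] := by
    have := PySem.Str.slice_to_neg_one l
    rw [show pvKey l = PySem.Str.slice l none (some (-1)) from rfl] at h2
    rw [h2] at this; simpa using this.symm
  rw [show pvHdr l = PySem.Chars.endswith l.toList ":".toList from rfl] at h1
  obtain ⟨t, ht⟩ := (PySem.Chars.endswith_iff _ _).mp h1
  have ht' : t = [] := by
    have := congrArg List.dropLast ht; simpa [hd] using this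
  apply String.toList_inj.mp
  rw [← ht, ht']; rfl

theorem pv_colon_mem_pairs (r : List String) (h : ":" ∈ r) : ∃ p ∈ pvPairs r, p.1 = "" := by
  induction r with
  | nil => simp at h
  | cons l r' ih =>
    rcases List.mem_cons.mp h with h' | h'
    · refine ⟨(pvKey ":", pvJoin (pvBlk r')), ?_, show pvKey ":" = "" by decide⟩
      rw [← h']
      simp [pvPairs, show pvHdr ":" = true from by decide]
    · obtain ⟨p, hp, hp1⟩ := ih h'
      refine ⟨p, ?_, hp1⟩
      simp only [pvPairs]
      split
      · exact List.mem_cons_of_mem _ hp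
      · exact hp

-- ---- rel machinery ----

theorem pv_contains_congr (d1 d2 : PySem.Dict String String)
    (h : List.Forall₂ pvR d1.items d2.items) (k : String) : d1.contains k = d2.contains k := by
  rw [PySem.Dict.contains_eq_decide_mem_keys, PySem.Dict.contains_eq_decide_mem_keys]
  have : d1.keys = d2.keys := pvR_fst _ _ h
  rw [this]

theorem pvR_append (l1 l2 m1 m2 : List (String × String))
    (h : List.Forall₂ pvR l1 l2) (h' : List.Forall₂ pvR m1 m2) :
    List.Forall₂ pvR (l1 ++ m1) (l2 ++ m2) := by
  induction h with
  | nil => exact h'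
  | cons hpq _ ihm => exact List.Forall₂.cons hpq ihm

theorem pvR_map_if (l1 l2 : List (String × String)) (h : List.Forall₂ pvR l1 l2) (k v : String) :
    List.Forall₂ pvR (l1.map (fun p => if p.1 == k then (k, v) else p))
      (l2.map (fun p => if p.1 == k then (k, v) else p)) := by
  induction h with
  | nil => exact List.Forall₂.nil
  | @cons p q _ _ hpq _ ihm =>
    obtain ⟨h1, h2⟩ := hpq
    refine List.Forall₂.cons ?_ ihm
    simp only [List.map_cons, h1]
    by_cases hk : q.1 == k
    · simp only [hk, if_true]
      exact ⟨rfl, Or.inl rfl⟩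
    · simp only [hk, if_false, Bool.false_eq_true]
      exact ⟨h1, h2⟩

theorem pvR_map_empty_eq (l1 l2 : List (String × String)) (h : List.Forall₂ pvR l1 l2) (v : String) :
    l1.map (fun p => if p.1 == "" then ("", v) else p) =
      l2.map (fun p => if p.1 == "" then ("", v) else p) := by
  induction h with
  | nil => rfl
  | @cons p q _ _ hpq _ ihm =>
    obtain ⟨h1, h2⟩ := hpq
    simp only [List.map_cons, ihm]
    congr 1
    by_cases hk : q.1 == ""
    · simp [h1, hk]
    · have hne : q.1 ≠ "" := by simpa using hk
      have h2' : p.2 = q.2 := h2.resolve_right (by rw [h1]; exact hne)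
      simp only [h1, hk, if_false, Bool.false_eq_true]
      exact Prod.ext h1 h2'

theorem pvR_eq_of_no_empty (l1 l2 : List (String × String)) (h : List.Forall₂ pvR l1 l2)
    (hne : ∀ p ∈ l2, p.1 ≠ "") : l1 = l2 := by
  induction h with
  | nil => rfl
  | @cons p q _ _ hpq _ ihm =>
    obtain ⟨h1, h2⟩ := hpq
    have hq : q.1 ≠ "" := hne q (by simp)
    have h2' : p.2 = q.2 := h2.resolve_right (by rw [h1]; exact hq)
    simp only [List.cons.injEq]
    exact ⟨Prod.ext h1 h2', ihm (fun p hp => hne p (by simp [hp]))⟩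

theorem pvR_insert (d1 d2 : PySem.Dict String String)
    (h : List.Forall₂ pvR d1.items d2.items) (k v : String) :
    List.Forall₂ pvR (d1.insert k v).items (d2.insert k v).items := by
  rw [PySem.Dict.items_insert, PySem.Dict.items_insert, pv_contains_congr d1 d2 h k]
  split
  · exact pvR_map_if _ _ h k v
  · exact pvR_append _ _ _ _ h (List.Forall₂.cons ⟨rfl, Or.inl rfl⟩ List.Forall₂.nil)

theorem pvR_insert_empty_eq (d1 d2 : PySem.Dict String String)
    (h : List.Forall₂ pvR d1.items d2.items) (v : String) :
    d1.insert "" v = d2.insert "" v := by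
  apply PySem.Dict.ext
  rw [PySem.Dict.items_insert, PySem.Dict.items_insert, pv_contains_congr d1 d2 h ""]
  split
  · exact pvR_map_empty_eq _ _ h v
  · rename_i hc
    have hne : ∀ p ∈ d2.items, p.1 ≠ "" := by
      intro p hp hp1
      have hm : ("" : String) ∈ d2.keys := by
        have : p.1 ∈ d2.items.map (fun p => p.1) := List.mem_map_of_mem hp
        rwa [hp1] at this
      rw [PySem.Dict.contains_eq_decide_mem_keys] at hc
      simp [hm] at hc
    rw [pvR_eq_of_no_empty _ _ h hne]

theorem pvR_insert_diff (d : PySem.Dict String String) (a b : String) :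
    List.Forall₂ pvR (d.insert "" a).items (d.insert "" b).items := by
  rw [PySem.Dict.items_insert, PySem.Dict.items_insert]
  split
  · induction d.items with
    | nil => exact List.Forall₂.nil
    | cons p l ihm =>
      refine List.Forall₂.cons ?_ ihm
      by_cases hk : p.1 == ""
      · have : p.1 = "" := by simpa using hk
        simp only [hk, if_true]
        exact ⟨rfl, Or.inr rfl⟩
      · simp only [hk, if_false, Bool.false_eq_true]
        exact ⟨rfl, Or.inl rfl⟩
  · exact pvR_append _ _ _ _ (pvR_refl _) (List.Forall₂.cons ⟨rfl, Or.inr rfl⟩ List.Forall₂.nil)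

theorem pvOV (ps : List (String × String)) (d1 d2 : PySem.Dict String String)
    (h : List.Forall₂ pvR d1.items d2.items) (he : ∃ p ∈ ps, p.1 = "") :
    ps.foldl pvIns d1 = ps.foldl pvIns d2 := by
  induction ps generalizing d1 d2 with
  | nil => simp at he
  | cons p ps' ih =>
    simp only [List.foldl_cons]
    by_cases hp : p.1 = ""
    · have : pvIns d1 p = pvIns d2 p := by
        show d1.insert p.1 p.2 = d2.insert p.1 p.2
        rw [hp]
        exact pvR_insert_empty_eq d1 d2 h p.2
      rw [this]
    · obtain ⟨q, hq, hq1⟩ := he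
      rcases List.mem_cons.mp hq with h' | h'
      · exact absurd (h' ▸ hq1) hp
      · exact ih _ _ (pvR_insert d1 d2 h p.1 p.2) ⟨q, h', hq1⟩

-- ---- dict lemmas ----

theorem pv_fin_keys (d : PySem.Dict String (List String)) : (pvFin d).keys = d.keys := by
  show (d.items.map (fun p => (p.1, pvJoin p.2))).map (fun p => p.1) = d.items.map (fun p => p.1)
  simp [List.map_map, Function.comp]

theorem pv_fin_insert (d : PySem.Dict String (List String)) (k : String) (v : List String) :
    pvFin (d.insert k v) = (pvFin d).insert k (pvJoin v) := by
  have hc : (pvFin d).contains k = d.contains k := by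
    rw [PySem.Dict.contains_eq_decide_mem_keys, PySem.Dict.contains_eq_decide_mem_keys,
      pv_fin_keys]
  apply PySem.Dict.ext
  show (d.insert k v).items.map (fun p => (p.1, pvJoin p.2)) = ((pvFin d).insert k (pvJoin v)).items
  rw [PySem.Dict.items_insert, PySem.Dict.items_insert, hc]
  have hit : (pvFin d).items = d.items.map (fun p => (p.1, pvJoin p.2)) := rfl
  split
  · rw [hit, List.map_map, List.map_map]
    apply List.map_congr_left
    intro p _
    by_cases hk : p.1 = k <;> simp [hk]
  · rw [hit, List.map_append]
    rfl

theorem pv_insert_getD_self (d : PySem.Dict String (List String)) (k : String)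
    (hnd : d.keys.Nodup) (hc : d.contains k = true) : d.insert k (d.getD k []) = d := by
  apply PySem.Dict.ext
  rw [PySem.Dict.items_insert, hc, if_pos rfl]
  have : ∀ p ∈ d.items, (if p.1 == k then (k, d.getD k []) else p) = p := by
    intro p hp
    by_cases hk : p.1 == k
    · have hk' : p.1 = k := by simpa using hk
      have hm : (k, p.2) ∈ d.items := by rw [← hk']; exact hp
      have := PySem.Dict.getD_of_mem_items d hm hnd []
      simp only [hk, if_true, this]
      rw [← hk']
    · simp [hk]
  rw [List.map_congr_left this]
  simp

-- ---- takeWhile / C lemmas ----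

theorem pv_tw_append_pass {α : Type} (p : α → Bool) (xs ys : List α)
    (h : ∀ x ∈ xs, p x = true) : (xs ++ ys).takeWhile p = xs ++ ys.takeWhile p := by
  induction xs with
  | nil => rfl
  | cons a l ih => simp [List.takeWhile, h a (by simp), ih (fun x hx => h x (by simp [hx]))]

theorem pv_tw_append_fail {α : Type} (p : α → Bool) (xs ys : List α)
    (h : ∃ x ∈ xs, p x = false) : (xs ++ ys).takeWhile p = xs.takeWhile p := by
  induction xs with
  | nil => simp_all
  | cons a l ih =>
    by_cases ha : p a = true
    · obtain ⟨x, hx, hpx⟩ := h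
      rcases List.mem_cons.mp hx with hx' | hx'
      · rw [hx'] at hpx; rw [hpx] at ha; exact absurd ha (by simp)
      · simp [List.takeWhile_cons, ha, ih ⟨x, hx', hpx⟩]
    · have ha' : p a = false := by revert ha; cases p a <;> simp
      simp [List.takeWhile_cons, ha']

theorem pvC_tail (l : String) (rest : List String) (h : pvC (l :: rest)) : pvC rest := by
  intro hm
  have h1 : (l :: rest).reverse.takeWhile (fun x => x != ":") =
      rest.reverse.takeWhile (fun x => x != ":") := by
    have : (l :: rest).reverse = rest.reverse ++ [l] := by simp
    rw [this]
    exact pv_tw_append_fail _ _ _ ⟨":", by simpa using hm, by simp⟩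
  have := h (by simp [hm])
  rwa [h1] at this

theorem pvC_colon_head (rest : List String) (hnm : ":" ∉ rest) (h : pvC (":" :: rest)) :
    pvBlk rest = [] := by
  have h1 : (":" :: rest).reverse.takeWhile (fun x => x != ":") = rest.reverse := by
    have : (":" :: rest).reverse = rest.reverse ++ [":"] := by simp
    rw [this, pv_tw_append_pass]
    · simp
    · intro x hx
      simp only [List.mem_reverse] at hx
      simp [bne_iff_ne]
      exact fun hc => hnm (hc ▸ hx)
  have := h (by simp)
  rwa [h1, List.reverse_reverse] at this

-- ---- main A-side lemma ----

theorem pv_patch_nilblk (lines : List String) (d : PySem.Dict String (List String))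
    (k : Option String) (hb : pvBlk lines = [])
    (hOK : ∀ key, k = some key → key ≠ "" → d.contains key = true)
    (hnd : d.keys.Nodup) : pvPatch d k lines = pvFin d := by
  match k with
  | none => rfl
  | some key =>
    by_cases hke : key = ""
    · simp [pvPatch, hke]
    · simp only [pvPatch, if_neg hke, hb, List.append_nil]
      rw [pv_insert_getD_self d key hnd (hOK key rfl hke)]

theorem pvL (lines : List String) (d : PySem.Dict String (List String)) (k : Option String)
    (hC : pvC lines)
    (hOK : ∀ key, k = some key → key ≠ "" → d.contains key = true)
    (hnd : d.keys.Nodup) :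
    pvFin ((lines.foldl pvStepA (d, k)).1) = (pvPairs lines).foldl pvIns (pvPatch d k lines) := by
  induction lines generalizing d k with
  | nil =>
    simp only [List.foldl_nil, pvPairs]
    exact (pv_patch_nilblk [] d k rfl hOK hnd).symm
  | cons l rest ih =>
    have hC' := pvC_tail l rest hC
    simp only [List.foldl_cons]
    by_cases hh : pvHdr l = true
    · have hstep : pvStepA (d, k) l = (d.insert (pvKey l) [], some (pvKey l)) := by
        simp only [pvStepA]
        rw [if_pos (show PySem.Str.endswith l ":" = true from hh)]
        rfl
      rw [hstep]
      have hblk0 : pvBlk (l :: rest) = [] := by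
        simp [pvBlk, List.takeWhile_cons, hh]
      have hpatch : pvPatch d k (l :: rest) = pvFin d := pv_patch_nilblk _ d k hblk0 hOK hnd
      have hpairs : pvPairs (l :: rest) = (pvKey l, pvJoin (pvBlk rest)) :: pvPairs rest := by
        simp [pvPairs, hh]
      rw [hpairs, List.foldl_cons, hpatch]
      by_cases hk' : pvKey l = ""
      · have hl : l = ":" := pv_hdr_key_colon l hh hk'
        have hOK' : ∀ key, some (pvKey l) = some key → key ≠ "" → (d.insert (pvKey l) []).contains key = true := by
          intro key hkey hne
          injection hkey with hkey
          exact absurd (hkey ▸ hk').symm (Ne.symm hne)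
        rw [ih (d.insert (pvKey l) []) (some (pvKey l)) hC' hOK' (PySem.Dict.nodup_keys_insert d _ _ hnd)]
        have : pvPatch (d.insert (pvKey l) []) (some (pvKey l)) rest = (pvFin d).insert "" (pvJoin []) := by
          simp only [pvPatch, if_pos hk']
          rw [hk', pv_fin_insert]
        rw [this]
        show _ = List.foldl pvIns (pvIns (pvFin d) (pvKey l, pvJoin (pvBlk rest))) (pvPairs rest)
        show _ = List.foldl pvIns ((pvFin d).insert (pvKey l) (pvJoin (pvBlk rest))) (pvPairs rest)
        rw [hk']
        by_cases hb : pvBlk rest = []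
        · rw [hb]
        · have hcm : (":" : String) ∈ rest := by
            by_contra hnm
            exact hb (pvC_colon_head rest hnm (hl ▸ hC))
          exact pvOV (pvPairs rest) _ _ (pvR_insert_diff (pvFin d) (pvJoin []) (pvJoin (pvBlk rest)))
            (pv_colon_mem_pairs rest hcm)
      · have hOK' : ∀ key, some (pvKey l) = some key → key ≠ "" → (d.insert (pvKey l) []).contains key = true := by
          intro key hkey _
          injection hkey with hkey
          rw [← hkey]
          exact PySem.Dict.contains_insert_self d _ _
        rw [ih (d.insert (pvKey l) []) (some (pvKey l)) hC' hOK' (PySem.Dict.nodup_keys_insert d _ _ hnd)]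
        have : pvPatch (d.insert (pvKey l) []) (some (pvKey l)) rest
            = (pvFin d).insert (pvKey l) (pvJoin (pvBlk rest)) := by
          simp only [pvPatch, if_neg hk']
          rw [PySem.Dict.getD_insert_self, PySem.Dict.insert_insert_self, List.nil_append,
            pv_fin_insert]
        rw [this]
        rfl
    · have hpairs : pvPairs (l :: rest) = pvPairs rest := by
        simp [pvPairs, hh]
      have hblkc : pvBlk (l :: rest) = l :: pvBlk rest := by
        simp only [pvBlk, List.takeWhile_cons]
        rw [show (!pvHdr l) = true by simp [hh]]
        rfl
      match k with
      | none =>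
        have hstep : pvStepA (d, none) l = (d, none) := by
          simp only [pvStepA]
          rw [if_neg (show ¬ PySem.Str.endswith l ":" = true from hh)]
        rw [hstep, hpairs, ih d none hC' (by intro key h; cases h) hnd]
        rfl
      | some key =>
        by_cases hke : key = ""
        · have hstep : pvStepA (d, some key) l = (d, some key) := by
            simp only [pvStepA]
            rw [if_neg (show ¬ PySem.Str.endswith l ":" = true from hh)]
            simp [hke]
          rw [hstep, hpairs, ih d (some key) hC' hOK hnd]
          simp [pvPatch, hke]
        · have hstep : pvStepA (d, some key) l
              = (d.insert key (d.getD key [] ++ [l]), some key) := by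
            simp only [pvStepA]
            rw [if_neg (show ¬ PySem.Str.endswith l ":" = true from hh)]
            simp [hke]
            rfl
          rw [hstep, hpairs]
          have hOK' : ∀ key', some key = some key' → key' ≠ "" → (d.insert key (d.getD key [] ++ [l])).contains key' = true := by
            intro key' hkey _
            injection hkey with hkey
            rw [← hkey]
            exact PySem.Dict.contains_insert_self d _ _
          rw [ih _ (some key) hC' hOK' (PySem.Dict.nodup_keys_insert d _ _ hnd)]
          have h1 : pvPatch (d.insert key (d.getD key [] ++ [l])) (some key) rest
              = pvFin (d.insert key (d.getD key [] ++ (l :: pvBlk rest))) := by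
            simp only [pvPatch, if_neg hke]
            rw [PySem.Dict.getD_insert_self, PySem.Dict.insert_insert_self]
            congr 2
            simp
          have h2 : pvPatch d (some key) (l :: rest)
              = pvFin (d.insert key (d.getD key [] ++ (l :: pvBlk rest))) := by
            simp only [pvPatch, if_neg hke, hblkc]
          rw [h1, h2]

-- ---- B-side lemmas ----

theorem pvHIdx_ge (xs : List String) (t : Nat) : ∀ i ∈ pvHIdx t xs, t ≤ i := by
  induction xs generalizing t with
  | nil => simp [pvHIdx]
  | cons x r ih =>
    intro i hi
    simp only [pvHIdx] at hi
    split at hi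
    · rcases List.mem_cons.mp hi with h | h
      · omega
      · have := ih (t+1) i h; omega
    · have := ih (t+1) i hi; omega

theorem pv_take_headD (r : List String) (t : Nat) :
    r.take ((pvHIdx t r).headD (t + r.length) - t) = pvBlk r := by
  induction r generalizing t with
  | nil => simp [pvHIdx, pvBlk]
  | cons x xs ih =>
    by_cases hh : pvHdr x = true
    · simp [pvHIdx, hh, pvBlk, List.takeWhile_cons]
    · have hhx : pvHIdx t (x :: xs) = pvHIdx (t+1) xs := by simp [pvHIdx, hh]
      have hdef : t + (x :: xs).length = t + 1 + xs.length := by simp; omega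
      rw [hhx, hdef]
      have hb : t + 1 ≤ (pvHIdx (t+1) xs).headD (t + 1 + xs.length) := by
        cases hcase : pvHIdx (t+1) xs with
        | nil => simp
        | cons i is =>
          have : i ∈ pvHIdx (t+1) xs := by rw [hcase]; simp
          have := pvHIdx_ge xs (t+1) i this
          simpa [hcase] using this
      have harith : (pvHIdx (t+1) xs).headD (t + 1 + xs.length) - t
          = ((pvHIdx (t+1) xs).headD (t + 1 + xs.length) - (t+1)) + 1 := by omega
      rw [harith, List.take_succ_cons, ih (t+1)]
      simp only [pvBlk, List.takeWhile_cons]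
      rw [show (!pvHdr x) = true by simp [hh]]
      simp

theorem pvE0 (lines : List String) (s : Nat) :
    ((PySem.List.enumerate lines (s : Int)).filter (fun p => PySem.Str.endswith p.2 ":")).map
        (fun p => p.1) = (pvHIdx s lines).map (Int.ofNat) := by
  induction lines generalizing s with
  | nil => simp [pvHIdx, PySem.List.enumerate_nil]
  | cons l r ih =>
    rw [PySem.List.enumerate_cons]
    have hcast : (s : Int) + 1 = ((s + 1 : Nat) : Int) := by push_cast; ring
    by_cases hh : PySem.Str.endswith l ":" = true
    · simp only [List.filter_cons, hh, if_pos]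
      simp only [List.map_cons]
      rw [hcast, ih (s+1)]
      have hh' : pvHdr l = true := hh
      simp [pvHIdx, hh']
    · have hh' : pvHdr l = false := by simpa using hh
      simp only [List.filter_cons]
      rw [show (PySem.Str.endswith l ":") = false from hh']
      simp only [Bool.false_eq_true, if_false]
      rw [hcast, ih (s+1)]
      simp [pvHIdx, hh']

theorem pvGN (suf pre : List String) :
    ((pvHIdx pre.length suf).zip ((pvHIdx pre.length suf).tail ++ [(pre ++ suf).length])).map
        (pvFn (pre ++ suf)) = pvPairs suf := by
  induction suf generalizing pre with
  | nil => simp [pvHIdx, pvPairs]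
  | cons l r ih =>
    have hfull : pre ++ l :: r = (pre ++ [l]) ++ r := by simp
    have hlen : (pre ++ [l]).length = pre.length + 1 := by simp
    by_cases hh : pvHdr l = true
    · have hidx : pvHIdx pre.length (l :: r) = pre.length :: pvHIdx (pre.length + 1) r := by
        simp [pvHIdx, hh]
      have hN : (pre ++ l :: r).length = pre.length + 1 + r.length := by simp; omega
      rw [hidx]
      have hzip : ∀ (hs : List Nat) (s N : Nat) (F : Nat × Nat → String × String),
          ((s :: hs).zip (hs ++ [N])).map F
            = F (s, hs.headD N) :: (hs.zip (hs.tail ++ [N])).map F := by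
        intro hs s N F
        cases hs <;> simp
      have htail : (pre.length :: pvHIdx (pre.length + 1) r).tail = pvHIdx (pre.length + 1) r := rfl
      rw [htail, hzip]
      have hrec : ((pvHIdx (pre.length + 1) r).zip
            ((pvHIdx (pre.length + 1) r).tail ++ [(pre ++ l :: r).length])).map (pvFn (pre ++ l :: r))
          = pvPairs r := by
        have := ih (pre ++ [l])
        rwa [hlen, ← hfull] at this
      rw [hrec]
      have hhead : pvFn (pre ++ l :: r) (pre.length, (pvHIdx (pre.length + 1) r).headD (pre ++ l :: r).length)
          = (pvKey l, pvJoin (pvBlk r)) := by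
        simp only [pvFn]
        have hg : (pre ++ l :: r).getD pre.length "" = l := by
          rw [List.getD_eq_getElem?_getD, List.getElem?_append_right (by omega)]
          simp
        have hd : ∀ pre' : List String, (pre' ++ l :: r).drop (pre'.length + 1) = r := by
          intro pre'
          induction pre' with
          | nil => rfl
          | cons a t iht => simpa using iht
        rw [hg, hd pre, hN]
        rw [pv_take_headD r (pre.length + 1)]
      rw [hhead]
      simp [pvPairs, hh]
    · have hidx : pvHIdx pre.length (l :: r) = pvHIdx (pre.length + 1) r := by
        simp [pvHIdx, hh]
      rw [hidx]
      have := ih (pre ++ [l])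
      rw [hlen, ← hfull] at this
      rw [this]
      simp [pvPairs, hh]

-- ---- lemmas for the tight claim (A ≠ B everywhere inside D_) ----

theorem pv_fin_get? (d : PySem.Dict String (List String)) (k : String) :
    (pvFin d).get? k = (d.get? k).map pvJoin := by
  obtain ⟨l⟩ := d
  induction l with
  | nil => rfl
  | cons p t ih =>
    show (PySem.Dict.mk ((p.1, pvJoin p.2) :: t.map (fun p => (p.1, pvJoin p.2)))).get? k = _
    rw [PySem.Dict.get?_mk_cons, PySem.Dict.get?_mk_cons]
    by_cases hk : p.1 == k
    · simp [hk]
    · simp only [hk, Bool.false_eq_true, if_false]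
      exact ih

theorem pvA_get_empty (lines : List String) (d : PySem.Dict String (List String)) (k : Option String) :
    ((lines.foldl pvStepA (d, k)).1).get? ""
      = if ":" ∈ lines then some [] else d.get? "" := by
  induction lines generalizing d k with
  | nil => simp
  | cons l rest ih =>
    simp only [List.foldl_cons]
    by_cases hh : pvHdr l = true
    · have hstep : pvStepA (d, k) l = (d.insert (pvKey l) [], some (pvKey l)) := by
        simp only [pvStepA]
        rw [if_pos (show PySem.Str.endswith l ":" = true from hh)]
        rfl
      rw [hstep, ih]
      by_cases hl : l = ":"
      · have hk : pvKey l = "" := by rw [hl]; decide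
        have hmem : (":" : String) ∈ l :: rest := by rw [hl]; simp
        rw [if_pos hmem]
        by_cases hm : (":" : String) ∈ rest
        · rw [if_pos hm]
        · rw [if_neg hm, hk, PySem.Dict.get?_insert]
          simp
      · have hk : pvKey l ≠ "" := fun h => hl (pv_hdr_key_colon l hh h)
        rw [PySem.Dict.get?_insert, if_neg (Ne.symm hk)]
        have : ((":" : String) ∈ l :: rest) ↔ ((":" : String) ∈ rest) := by
          constructor
          · intro hx
            rcases List.mem_cons.mp hx with h' | h'
            · exact absurd h'.symm hl
            · exact h'
          · exact fun h => List.mem_cons_of_mem _ h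
        by_cases hm : (":" : String) ∈ rest
        · rw [if_pos hm, if_pos (this.mpr hm)]
        · rw [if_neg hm, if_neg (fun hx => hm (this.mp hx))]
    · have hlne : l ≠ ":" := fun h => hh (by rw [h]; decide)
      have hcond : ((":" : String) ∈ l :: rest) ↔ ((":" : String) ∈ rest) := by
        constructor
        · intro hx
          rcases List.mem_cons.mp hx with h' | h'
          · exact absurd h'.symm hlne
          · exact h'
        · exact fun h => List.mem_cons_of_mem _ h
      have hiff : ∀ d' k', ((rest.foldl pvStepA (d', k')).1).get? ""
          = if (":" : String) ∈ rest then some [] else d'.get? "" := fun d' k' => ih d' k'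
      match k with
      | none =>
        have hstep : pvStepA (d, none) l = (d, none) := by
          simp only [pvStepA]
          rw [if_neg (show ¬ PySem.Str.endswith l ":" = true from hh)]
        rw [hstep, hiff]
        by_cases hm : (":" : String) ∈ rest
        · rw [if_pos hm, if_pos (hcond.mpr hm)]
        · rw [if_neg hm, if_neg (fun hx => hm (hcond.mp hx))]
      | some key =>
        by_cases hke : key = ""
        · have hstep : pvStepA (d, some key) l = (d, some key) := by
            simp only [pvStepA]
            rw [if_neg (show ¬ PySem.Str.endswith l ":" = true from hh)]
            simp [hke]
          rw [hstep, hiff]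
          by_cases hm : (":" : String) ∈ rest
          · rw [if_pos hm, if_pos (hcond.mpr hm)]
          · rw [if_neg hm, if_neg (fun hx => hm (hcond.mp hx))]
        · have hstep : pvStepA (d, some key) l
              = (d.insert key (d.getD key [] ++ [l]), some key) := by
            simp only [pvStepA]
            rw [if_neg (show ¬ PySem.Str.endswith l ":" = true from hh)]
            simp [hke]
            rfl
          rw [hstep, hiff]
          rw [PySem.Dict.get?_insert, if_neg (Ne.symm hke)]
          by_cases hm : (":" : String) ∈ rest
          · rw [if_pos hm, if_pos (hcond.mpr hm)]
          · rw [if_neg hm, if_neg (fun hx => hm (hcond.mp hx))]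

theorem pv_foldl_get? (ps : List (String × String)) (d : PySem.Dict String String) (k : String) :
    (ps.foldl pvIns d).get? k
      = ((ps.reverse.find? (fun p => p.1 == k)).map (fun q => q.2)).or (d.get? k) := by
  induction ps generalizing d with
  | nil => simp
  | cons p ps ih =>
    simp only [List.foldl_cons, List.reverse_cons]
    rw [ih, List.find?_append]
    cases h : ps.reverse.find? (fun p => p.1 == k) with
    | some q => simp [Option.or]
    | none =>
      simp only [Option.or, Option.map]
      show (d.insert p.1 p.2).get? k = _
      rw [PySem.Dict.get?_insert]
      by_cases hk : p.1 = k
      · simp [List.find?, hk]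
      · have hb : (p.1 == k) = false := by simpa using hk
        simp only [List.find?, hb]
        rw [if_neg (fun h : k = p.1 => hk h.symm)]

theorem pv_pairs_append (pre rest : List String) :
    ∃ pfx, pvPairs (pre ++ rest) = pfx ++ pvPairs rest := by
  induction pre with
  | nil => exact ⟨[], rfl⟩
  | cons x t ih =>
    obtain ⟨pfx, hp⟩ := ih
    simp only [List.cons_append, pvPairs]
    split
    · exact ⟨_ :: pfx, by rw [hp]; rfl⟩
    · exact ⟨pfx, hp⟩

theorem pv_pairs_no_empty (suf : List String) (h : ":" ∉ suf) :
    ∀ p ∈ pvPairs suf, p.1 ≠ "" := by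
  induction suf with
  | nil => simp [pvPairs]
  | cons l r ih =>
    intro p hp
    have hr : ":" ∉ r := fun hm => h (List.mem_cons_of_mem _ hm)
    simp only [pvPairs] at hp
    split at hp
    · rename_i hhdr
      rcases List.mem_cons.mp hp with h' | h'
      · intro h0
        rw [h'] at h0
        exact h (by rw [← pv_hdr_key_colon l hhdr h0]; simp)
      · exact ih hr p h'
    · exact ih hr p hp

theorem pv_rev_split (rl : List String) (h : ":" ∈ rl) :
    ∃ dt, rl = rl.takeWhile (fun l => l != ":") ++ ":" :: dt := by
  induction rl with
  | nil => simp at h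
  | cons x t ih =>
    by_cases hx : x = ":"
    · refine ⟨t, ?_⟩
      rw [hx]
      rfl
    · have hxne : (x != ":") = true := by simpa using hx
      have hmem : (":" : String) ∈ t := by
        rcases List.mem_cons.mp h with h' | h'
        · exact absurd h'.symm hx
        · exact h'
      obtain ⟨dt, hdt⟩ := ih hmem
      refine ⟨dt, ?_⟩
      rw [List.takeWhile_cons, hxne]
      simp only [if_true]
      rw [List.cons_append, ← hdt]

theorem pv_join_ne_empty (b : String) (hb : b ≠ "") (bs : List String) :
    pvJoin (b :: bs) ≠ "" := by
  intro he
  have h0 : (pvJoin (b :: bs)).toList = [] := by rw [he]; rfl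
  rw [show pvJoin (b :: bs) = PySem.Str.join "\n" (b :: bs) from rfl, PySem.Str.toList_join] at h0
  cases bs with
  | nil =>
    rw [show (List.map String.toList [b]) = [b.toList] from rfl, PySem.Chars.join_singleton] at h0
    exact hb (by rcases b with ⟨⟩; simp_all)
  | cons c cs =>
    rw [show (List.map String.toList (b :: c :: cs))
        = b.toList :: c.toList :: (cs.map String.toList) from rfl,
      PySem.Chars.join_cons_cons] at h0
    simp at h0

theorem pv_clean_ne (text : String) : ∀ x ∈ pvClean text, x ≠ "" := by
  intro x hx
  have := List.of_mem_filter hx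
  simpa using this

-- ===== VERDICT (by name: the statement is the Claim_ definition above) =====
theorem pvB_eval (text : String) :
    parse_panel_text_alt text
      = ((pvPairs (pvClean text)).foldl pvIns PySem.Dict.empty).items := by
  have hhead : ((PySem.List.enumerate (pvClean text) 0).filter
        (fun p => PySem.Str.endswith p.2 ":")).map (fun p => p.1)
      = (pvHIdx 0 (pvClean text)).map (Int.ofNat) := by
    have := pvE0 (pvClean text) 0
    rwa [Nat.cast_zero] at this
  have h0 : parse_panel_text_alt text
      = (((((PySem.List.enumerate (pvClean text) 0).filter
            (fun p => PySem.Str.endswith p.2 ":")).map (fun p => p.1)).zip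
          (PySem.List.slice (((PySem.List.enumerate (pvClean text) 0).filter
            (fun p => PySem.Str.endswith p.2 ":")).map (fun p => p.1)) (some 1) none
            ++ [((pvClean text).length : Int)])).foldl
        (fun (d : PySem.Dict String String) p =>
          d.insert (PySem.Str.slice (PySem.List.pyGetD (pvClean text) p.1 "") none (some (-1)))
                   (PySem.Str.join "\n" (PySem.List.slice (pvClean text) (some (p.1 + 1)) (some p.2))))
        PySem.Dict.empty).items := rfl
  rw [h0, hhead, PySem.List.slice_from_one,
    show ((pvHIdx 0 (pvClean text)).map (Int.ofNat)).tail
      = ((pvHIdx 0 (pvClean text)).tail).map (Int.ofNat) from (List.map_tail ..).symm,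
    show [((pvClean text).length : Int)]
      = [(pvClean text).length].map (Int.ofNat) from rfl,
    ← List.map_append, List.zip_map, List.foldl_map]
  rw [List.foldl_ext _ (fun d q => pvIns d (pvFn (pvClean text) q)) PySem.Dict.empty ?_]
  · rw [← List.foldl_map]
    have hg := pvGN (pvClean text) []
    rw [show (([] : List String) ++ pvClean text) = pvClean text from rfl] at hg
    rw [show (([] : List String)).length = 0 from rfl] at hg
    rw [hg]
  · intro d q _
    obtain ⟨q1, q2⟩ := q
    show d.insert (PySem.Str.slice (PySem.List.pyGetD (pvClean text) ((q1 : Int)) "") none (some (-1)))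
        (PySem.Str.join "\n" (PySem.List.slice (pvClean text) (some ((q1 : Int) + 1)) (some (q2 : Int))))
      = pvIns d (pvFn (pvClean text) (q1, q2))
    rw [PySem.List.pyGetD_natCast,
      show ((q1 : Int) + 1) = ((q1 + 1 : Nat) : Int) by push_cast; ring,
      PySem.List.slice_natCast]
    rfl

theorem parse_panel_text_spec : Claim_unchanged_parse_panel_text := by
  intro text _ hD
  have hC : pvC (pvClean text) := by
    intro hm
    by_contra hb
    exact hD ⟨hm, hb⟩
  have hA : parse_panel_text text
      = ((pvPairs (pvClean text)).foldl pvIns PySem.Dict.empty).items := by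
    have h0 : parse_panel_text text
        = (pvFin (((pvClean text).foldl pvStepA (PySem.Dict.empty, none)).1)).items := rfl
    rw [h0, pvL (pvClean text) PySem.Dict.empty none hC
      (by intro key h; exact absurd h (by simp)) PySem.Dict.nodup_keys_empty]
    rfl
  rw [hA, pvB_eval text]

theorem parse_panel_text_changed : Claim_changed_parse_panel_text := by
  unfold Claim_changed_parse_panel_text; decide

theorem parse_panel_text_tight : Claim_exact_parse_panel_text := by
  intro text _ hD heq
  obtain ⟨hmem, hblk⟩ := hD
  obtain ⟨dt, hdt⟩ := pv_rev_split (pvClean text).reverse (by simpa using hmem)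
  have hsplit : pvClean text
      = dt.reverse ++ ":" :: ((pvClean text).reverse.takeWhile (fun l => l != ":")).reverse := by
    have := congrArg List.reverse hdt
    simpa using this
  have hnot : (":" : String) ∉ ((pvClean text).reverse.takeWhile (fun l => l != ":")).reverse := by
    intro hx
    have := List.mem_takeWhile_imp (List.mem_reverse.mp hx)
    simp at this
  have hblk' : pvBlk (((pvClean text).reverse.takeWhile (fun l => l != ":")).reverse) ≠ [] := hblk
  have hA : (pvFin (((pvClean text).foldl pvStepA (PySem.Dict.empty, none))).1).get? "" = some "" := by
    rw [pv_fin_get?, pvA_get_empty, if_pos hmem]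
    rfl
  have hcons : pvPairs (":" :: (((pvClean text).reverse.takeWhile (fun l => l != ":")).reverse))
      = ("", pvJoin (pvBlk (((pvClean text).reverse.takeWhile (fun l => l != ":")).reverse)))
        :: pvPairs (((pvClean text).reverse.takeWhile (fun l => l != ":")).reverse) := by
    rw [show pvPairs (":" :: (((pvClean text).reverse.takeWhile (fun l => l != ":")).reverse))
        = if pvHdr ":" then (pvKey ":", pvJoin (pvBlk (((pvClean text).reverse.takeWhile (fun l => l != ":")).reverse)))
            :: pvPairs (((pvClean text).reverse.takeWhile (fun l => l != ":")).reverse)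
          else pvPairs (((pvClean text).reverse.takeWhile (fun l => l != ":")).reverse) from rfl]
    rw [if_pos (show pvHdr ":" = true from by decide)]
    rw [show pvKey ":" = "" from by decide]
  have hBd : ((pvPairs (pvClean text)).foldl pvIns PySem.Dict.empty).get? ""
      = some (pvJoin (pvBlk (((pvClean text).reverse.takeWhile (fun l => l != ":")).reverse))) := by
    rw [pv_foldl_get?]
    obtain ⟨pfx, hp⟩ := pv_pairs_append dt.reverse
      (":" :: (((pvClean text).reverse.takeWhile (fun l => l != ":")).reverse))
    rw [show pvPairs (pvClean text)
        = pvPairs (dt.reverse ++ ":" :: (((pvClean text).reverse.takeWhile (fun l => l != ":")).reverse))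
        from by rw [← hsplit]]
    rw [hp, hcons, List.reverse_append, List.reverse_cons, List.find?_append, List.find?_append]
    have hQ : ((pvPairs (((pvClean text).reverse.takeWhile (fun l => l != ":")).reverse)).reverse.find?
        (fun p => p.1 == "")) = none := by
      rw [List.find?_eq_none]
      intro p hp'
      have := pv_pairs_no_empty _ hnot p (List.mem_reverse.mp hp')
      simpa using this
    rw [hQ]
    simp [Option.or]
  have hAi : parse_panel_text text
      = (pvFin (((pvClean text).foldl pvStepA (PySem.Dict.empty, none)).1)).items := rfl
  have hde : pvFin (((pvClean text).foldl pvStepA (PySem.Dict.empty, none)).1)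
      = (pvPairs (pvClean text)).foldl pvIns PySem.Dict.empty := by
    apply PySem.Dict.ext
    exact (hAi.symm.trans heq).trans (pvB_eval text)
  rw [hde, hBd] at hA
  have hj := Option.some.inj hA
  cases hc : pvBlk (((pvClean text).reverse.takeWhile (fun l => l != ":")).reverse) with
  | nil => exact hblk' hc
  | cons b bs =>
    have hbmem : b ∈ pvClean text := by
      have h1 : b ∈ pvBlk (((pvClean text).reverse.takeWhile (fun l => l != ":")).reverse) := by
        rw [hc]; simp
      have h2 := List.IsPrefix.mem h1 (List.takeWhile_prefix _)
      have h3 := List.mem_reverse.mp h2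
      exact List.mem_reverse.mp (List.IsPrefix.mem h3 (List.takeWhile_prefix _))
    exact pv_join_ne_empty b (pv_clean_ne text b hbmem) bs (by rw [← hc]; exact hj)
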